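-- pv_equiv track=rewrite | github.com/gooksenin/VRP | vrp.py | find_all_index
-- ===== SOURCE A (Python) =====
-- from itertools import product, permutations
--
-- def find_index(whoGoesWhere, carNumber):
--     indexes = []
--     for i, x in enumerate(whoGoesWhere):
--         # i is the index, x is the car
--         if x == carNumber:
--             indexes.append(i+3)
--     return indexes
--
-- def find_all_index(carList, numberOfRoutes):
--     cartesien_product = []
--     car_1_index = []
--     car_2_index = []
--     car_3_index = []
--     #all possible combinations of which car goes where
--     cartesien_product = list(product(carList, repeat = numberOfRoutes))
--
--     #fill possible combinations for each car
--     for index in cartesien_product: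
--         car_1_index.append(find_index(index, 1))
--         car_2_index.append(find_index(index, 2))
--         car_3_index.append(find_index(index, 3))
--
--     return car_1_index, car_2_index, car_3_index
-- ===== SOURCE B (Python) =====
-- from itertools import product
--
-- def find_all_index(carList, numberOfRoutes):
--     car_1_index, car_2_index, car_3_index = [], [], []
--     for combo in product(carList, repeat=numberOfRoutes):
--         c1, c2, c3 = [], [], []
--         for i, x in enumerate(combo):
--             if x == 1:
--                 c1.append(i + 3)
--             elif x == 2:
--                 c2.append(i + 3)
--             elif x == 3:
--                 c3.append(i + 3)
--         car_1_index.append(c1)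
--         car_2_index.append(c2)
--         car_3_index.append(c3)
--     return car_1_index, car_2_index, car_3_index
-- ===== Notes on version B (the rewrite author's own statement) =====
-- stated objective: simpler
-- what changed: Replaces the three find_index helper calls that each re-scan every product tuple with a single enumerate pass per tuple that classifies each position into the three per-car lists at once.
import Mathlib
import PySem

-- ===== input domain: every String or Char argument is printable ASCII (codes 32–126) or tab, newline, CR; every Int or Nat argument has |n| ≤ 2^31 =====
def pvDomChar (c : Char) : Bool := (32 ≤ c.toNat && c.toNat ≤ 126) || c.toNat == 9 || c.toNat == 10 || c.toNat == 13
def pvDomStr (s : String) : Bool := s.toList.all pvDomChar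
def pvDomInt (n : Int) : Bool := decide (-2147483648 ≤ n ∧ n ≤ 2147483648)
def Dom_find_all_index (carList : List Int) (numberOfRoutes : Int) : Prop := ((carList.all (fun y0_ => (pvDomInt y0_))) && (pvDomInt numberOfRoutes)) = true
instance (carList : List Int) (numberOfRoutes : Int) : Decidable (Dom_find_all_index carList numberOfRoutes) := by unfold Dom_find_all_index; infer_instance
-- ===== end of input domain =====

-- B replaces A's three per-tuple find_index scans with a single classifying pass per tuple (objective: simpler).
-- ===== PORT A =====
-- itertools.product(carList, repeat = r), leftmost factor varying slowest (exact port by hand)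
def pyProductRep (xs : List Int) : Nat → List (List Int)
  | 0 => [[]]
  | k+1 => xs.flatMap fun x => (pyProductRep xs k).map (fun t => x :: t)

def find_index (whoGoesWhere : List Int) (carNumber : Int) : List Int :=
  (PySem.List.enumerate whoGoesWhere).foldl
    (fun indexes p => if p.2 == carNumber then indexes ++ [p.1 + 3] else indexes) []

def find_all_index (carList : List Int) (numberOfRoutes : Int) : List (List Int) × List (List Int) × List (List Int) :=
  let cartesien_product := pyProductRep carList numberOfRoutes.toNat
  cartesien_product.foldl
    (fun acc index =>
      (acc.1 ++ [find_index index 1], acc.2.1 ++ [find_index index 2], acc.2.2 ++ [find_index index 3]))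
    ([], [], [])

-- ===== PORT B =====
-- one enumerate pass per tuple, classifying each position into the three lists
def classifyCombo (combo : List Int) : List Int × List Int × List Int :=
  (PySem.List.enumerate combo).foldl
    (fun c p =>
      if p.2 == 1 then (c.1 ++ [p.1 + 3], c.2.1, c.2.2)
      else if p.2 == 2 then (c.1, c.2.1 ++ [p.1 + 3], c.2.2)
      else if p.2 == 3 then (c.1, c.2.1, c.2.2 ++ [p.1 + 3])
      else c)
    ([], [], [])

def find_all_index_alt (carList : List Int) (numberOfRoutes : Int) : List (List Int) × List (List Int) × List (List Int) :=
  (pyProductRep carList numberOfRoutes.toNat).foldl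
    (fun acc combo =>
      let c := classifyCombo combo
      (acc.1 ++ [c.1], acc.2.1 ++ [c.2.1], acc.2.2 ++ [c.2.2]))
    ([], [], [])

-- ===== PRECONDITION & SPEC =====
-- Pre_ excludes negative numberOfRoutes, on which itertools.product raises ValueError.
def Pre_find_all_index (carList : List Int) (numberOfRoutes : Int) : Prop := 0 ≤ numberOfRoutes
instance (carList : List Int) (numberOfRoutes : Int) : Decidable (Pre_find_all_index carList numberOfRoutes) := by unfold Pre_find_all_index; infer_instance
def pvWitness_find_all_index : List Int × Int := ([1, 2, 3], 2)
def Spec_find_all_index (carList : List Int) (numberOfRoutes : Int) (out : List (List Int) × List (List Int) × List (List Int)) : Prop := out = find_all_index_alt carList numberOfRoutes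
instance (carList : List Int) (numberOfRoutes : Int) (out : List (List Int) × List (List Int) × List (List Int)) : Decidable (Spec_find_all_index carList numberOfRoutes out) := by unfold Spec_find_all_index; infer_instance

-- ===== CLAIM (what is proved, stated in full; the proofs are below) =====
def Claim_equal_find_all_index : Prop := ∀ (carList : List Int) (numberOfRoutes : Int), Dom_find_all_index carList numberOfRoutes → Pre_find_all_index carList numberOfRoutes → Spec_find_all_index carList numberOfRoutes (find_all_index carList numberOfRoutes)

-- ===== LEMMAS AND PROOFS =====

-- the single classifying fold of B equals the three separate folds of A, for any accumulators
theorem classify_fold_eq (l : List (Int × Int)) :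
    ∀ (a b c : List Int),
      l.foldl
        (fun c p =>
          if p.2 == 1 then (c.1 ++ [p.1 + 3], c.2.1, c.2.2)
          else if p.2 == 2 then (c.1, c.2.1 ++ [p.1 + 3], c.2.2)
          else if p.2 == 3 then (c.1, c.2.1, c.2.2 ++ [p.1 + 3])
          else c)
        (a, b, c)
      = (l.foldl (fun ix p => if p.2 == 1 then ix ++ [p.1 + 3] else ix) a,
         l.foldl (fun ix p => if p.2 == 2 then ix ++ [p.1 + 3] else ix) b,
         l.foldl (fun ix p => if p.2 == 3 then ix ++ [p.1 + 3] else ix) c) := by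
  induction l with
  | nil => intro a b c; rfl
  | cons p t ih =>
    intro a b c
    simp only [List.foldl_cons]
    split_ifs with h1 h2 h3 <;>
      first
        | exact ih _ _ _
        | (exfalso; simp only [beq_iff_eq] at *; omega)

theorem classifyCombo_eq (combo : List Int) :
    classifyCombo combo = (find_index combo 1, find_index combo 2, find_index combo 3) := by
  unfold classifyCombo find_index
  exact classify_fold_eq _ [] [] []

-- ===== VERDICT (by name: the statement is the Claim_ definition above) =====
theorem find_all_index_spec : Claim_equal_find_all_index := by
  intro carList numberOfRoutes _ _
  unfold Spec_find_all_index find_all_index find_all_index_alt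
  apply List.foldl_ext
  intro acc combo _
  simp [classifyCombo_eq]
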